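-- pv_equiv track=rewrite | github.com/dbae1145/AzureQueryChatbot | pdf_processor.py | locate_page_numbers
-- ===== SOURCE A (Python) =====
-- def locate_page_numbers(texts, chunks, page_map):
--     chunk_page_numbers = []
--     for chunk in chunks:
--         start_offset = texts.find(chunk)
--         end_offset = start_offset + len(chunk)
--         associated_pages = set()
--
--         for page, offset, content in page_map:
--             content_end_offset = offset + len(content)
--             if start_offset < content_end_offset and end_offset > offset:
--                 associated_pages.add(page)
--
--         chunk_page_numbers.append((chunk, sorted(list(associated_pages))))
--
--     return chunk_page_numbers
-- ===== SOURCE B (Python) =====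
-- def locate_page_numbers(texts, chunks, page_map):
--     # Group intervals by page once, sort the distinct pages once;
--     # per chunk just filter the sorted page list (no per-chunk set/sort).
--     intervals = {}
--     for page, offset, content in page_map:
--         intervals.setdefault(page, []).append((offset, offset + len(content)))
--     pages = sorted(intervals)
--     result = []
--     for chunk in chunks:
--         start = texts.find(chunk)
--         end = start + len(chunk)
--         result.append((chunk, [p for p in pages
--                                if any(start < e and end > o
--                                       for o, e in intervals[p])]))
--     return result
-- ===== Notes on version B (the rewrite author's own statement) =====
-- stated objective: alternative
-- what changed: B groups the page intervals into a dict keyed by page and sorts the distinct pages once up front, then each chunk just filters that pre-sorted page list with an overlap test, instead of A's per-chunk scan that accumulates a set and sorts it for every chunk.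
import Mathlib
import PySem

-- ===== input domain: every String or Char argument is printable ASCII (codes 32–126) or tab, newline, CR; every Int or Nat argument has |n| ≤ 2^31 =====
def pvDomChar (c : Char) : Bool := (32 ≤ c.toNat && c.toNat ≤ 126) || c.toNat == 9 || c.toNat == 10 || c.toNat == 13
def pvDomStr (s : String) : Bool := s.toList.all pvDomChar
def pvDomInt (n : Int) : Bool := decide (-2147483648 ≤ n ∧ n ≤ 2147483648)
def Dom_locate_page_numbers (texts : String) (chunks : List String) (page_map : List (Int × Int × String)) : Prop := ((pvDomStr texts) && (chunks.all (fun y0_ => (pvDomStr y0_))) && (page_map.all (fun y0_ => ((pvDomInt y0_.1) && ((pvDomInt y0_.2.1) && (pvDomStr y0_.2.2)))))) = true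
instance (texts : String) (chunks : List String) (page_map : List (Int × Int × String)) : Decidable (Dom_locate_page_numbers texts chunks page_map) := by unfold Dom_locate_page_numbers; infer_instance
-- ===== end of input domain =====

-- B groups the page intervals by page and sorts the distinct pages ONCE, then each chunk
-- filters that pre-sorted page list with an overlap test (no per-chunk set/sort). Same result.

-- ===== PORT A =====
def locate_page_numbers (texts : String) (chunks : List String) (page_map : List (Int × Int × String)) : List (String × List Int) :=
  chunks.foldl (fun chunk_page_numbers chunk =>
    let start_offset := PySem.Str.find texts chunk
    let end_offset := start_offset + PySem.Str.len chunk
    let associated_pages : PySem.Set Int := page_map.foldl (fun s t =>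
      let content_end_offset := t.2.1 + PySem.Str.len t.2.2
      if start_offset < content_end_offset ∧ end_offset > t.2.1 then PySem.Set.add s t.1 else s)
      PySem.Set.empty
    chunk_page_numbers ++ [(chunk, PySem.List.sorted associated_pages (fun x => x) false)]) []

-- ===== PORT B =====
def locate_page_numbers_alt (texts : String) (chunks : List String) (page_map : List (Int × Int × String)) : List (String × List Int) :=
  let intervals : PySem.Dict Int (List (Int × Int)) :=
    page_map.foldl (fun d t => d.modify t.1 [] (· ++ [(t.2.1, t.2.1 + PySem.Str.len t.2.2)])) PySem.Dict.empty
  let pages := PySem.List.sorted intervals.keys (fun x => x) false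
  chunks.map (fun chunk =>
    let start := PySem.Str.find texts chunk
    let «end» := start + PySem.Str.len chunk
    (chunk, pages.filter (fun p => (intervals.getD p []).any (fun iv => decide (start < iv.2 ∧ «end» > iv.1)))))

-- ===== PRECONDITION & SPEC =====
def Spec_locate_page_numbers (texts : String) (chunks : List String) (page_map : List (Int × Int × String)) (out : List (String × List Int)) : Prop := out = locate_page_numbers_alt texts chunks page_map
instance (texts : String) (chunks : List String) (page_map : List (Int × Int × String)) (out : List (String × List Int)) : Decidable (Spec_locate_page_numbers texts chunks page_map out) := by unfold Spec_locate_page_numbers; infer_instance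

-- ===== CLAIM (what is proved, stated in full; the proofs are below) =====
def Claim_equal_locate_page_numbers : Prop := ∀ (texts : String) (chunks : List String) (page_map : List (Int × Int × String)), Dom_locate_page_numbers texts chunks page_map → Spec_locate_page_numbers texts chunks page_map (locate_page_numbers texts chunks page_map)

-- ===== LEMMAS AND PROOFS =====

-- membership in A's conditionally-built set: exactly the overlapping entries' pages
theorem mem_foldl_cond_add (l : List (Int × Int × String)) (P : Int × Int × String → Prop)
    [DecidablePred P] (s : PySem.Set Int) (q : Int) :
    q ∈ l.foldl (fun s t => if P t then PySem.Set.add s t.1 else s) s ↔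
      q ∈ s ∨ ∃ t ∈ l, P t ∧ t.1 = q := by
  induction l generalizing s with
  | nil => simp
  | cons h t ih =>
    simp only [List.foldl_cons, ih]
    split_ifs with hp
    · simp only [PySem.Set.mem_add, List.mem_cons]
      constructor
      · rintro (⟨hq | rfl⟩ | ⟨u, hu, hPu, rfl⟩)
        · exact Or.inl hq
        · exact Or.inr ⟨h, Or.inl rfl, hp, rfl⟩
        · exact Or.inr ⟨u, Or.inr hu, hPu, rfl⟩
      · rintro (hq | ⟨u, (rfl | hu), hPu, rfl⟩)
        · exact Or.inl (Or.inl hq)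
        · exact Or.inl (Or.inr rfl)
        · exact Or.inr ⟨u, hu, hPu, rfl⟩
    · simp only [List.mem_cons]
      constructor
      · rintro (hq | ⟨u, hu, hPu, rfl⟩)
        · exact Or.inl hq
        · exact Or.inr ⟨u, Or.inr hu, hPu, rfl⟩
      · rintro (hq | ⟨u, (rfl | hu), hPu, rfl⟩)
        · exact Or.inl hq
        · exact absurd hPu hp
        · exact Or.inr ⟨u, hu, hPu, rfl⟩

theorem nodup_foldl_cond_add (l : List (Int × Int × String)) (P : Int × Int × String → Prop)
    [DecidablePred P] (s : PySem.Set Int) (h : s.Nodup) :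
    (l.foldl (fun s t => if P t then PySem.Set.add s t.1 else s) s).Nodup := by
  induction l generalizing s with
  | nil => exact h
  | cons x t ih =>
    simp only [List.foldl_cons]
    split_ifs
    · exact ih _ (PySem.Set.nodup_add s x.1 h)
    · exact ih _ h

theorem per_chunk (page_map : List (Int × Int × String)) (start e : Int) :
    PySem.List.sorted
      (page_map.foldl (fun s t =>
        if start < t.2.1 + PySem.Str.len t.2.2 ∧ e > t.2.1 then PySem.Set.add s t.1 else s)
        PySem.Set.empty) (fun x => x) false =
    (PySem.List.sorted
      (page_map.foldl (fun d t => d.modify t.1 [] (· ++ [(t.2.1, t.2.1 + PySem.Str.len t.2.2)])) PySem.Dict.empty).keys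
      (fun x => x) false).filter
      (fun p => ((page_map.foldl (fun d t => d.modify t.1 [] (· ++ [(t.2.1, t.2.1 + PySem.Str.len t.2.2)])) PySem.Dict.empty).getD p []).any
        (fun iv => decide (start < iv.2 ∧ e > iv.1))) := by
  set D := page_map.foldl (fun d t => d.modify t.1 [] (· ++ [(t.2.1, t.2.1 + PySem.Str.len t.2.2)])) PySem.Dict.empty with hD
  have hkeys : D.keys = PySem.Set.ofList (page_map.map (·.1)) := by
    rw [hD, PySem.Dict.keys_foldl_modify_key]
    simp [PySem.Set.update, PySem.Set.ofList, PySem.Dict.keys_empty]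
  have hgetD : ∀ q, D.getD q [] =
      (page_map.filter (fun t => t.1 == q)).map (fun t => (t.2.1, t.2.1 + PySem.Str.len t.2.2)) := by
    intro q
    have hfold : (page_map.map (fun t : Int × Int × String => (t.1, (t.2.1, t.2.1 + PySem.Str.len t.2.2)))).foldl
        (fun (d : PySem.Dict Int (List (Int × Int))) p => d.modify p.1 [] (· ++ [p.2])) PySem.Dict.empty
        = page_map.foldl (fun d t => d.modify t.1 [] (· ++ [(t.2.1, t.2.1 + PySem.Str.len t.2.2)])) PySem.Dict.empty := by
      rw [List.foldl_map]
    rw [hD, ← hfold, PySem.Dict.getD_foldl_modify_append]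
    simp [List.filter_map, List.map_map, Function.comp_def]
  have hpw : ((PySem.List.sorted D.keys (fun x => x) false).filter
      (fun p => (D.getD p []).any (fun iv => decide (start < iv.2 ∧ e > iv.1)))).Pairwise (· < ·) := by
    refine List.Pairwise.filter _ ?_
    rw [hkeys]
    exact PySem.List.sorted_ofList_pairwise_lt _
  refine PySem.List.sorted_eq_of_perm_of_pairwise_lt _ _ _ ?_ hpw
  refine (List.perm_ext_iff_of_nodup (hpw.imp (fun h => Int.ne_of_lt h))
    (nodup_foldl_cond_add _ _ _ List.nodup_nil)).mpr ?_
  intro q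
  rw [List.mem_filter, PySem.List.mem_sorted, hkeys, PySem.Set.mem_ofList,
    mem_foldl_cond_add _ _ _ q, hgetD]
  simp only [List.any_eq_true, List.mem_map, List.mem_filter, List.not_mem_nil, false_or,
    beq_iff_eq, decide_eq_true_eq, List.mem_map]
  constructor
  · rintro ⟨⟨t, ht, rfl⟩, iv, ⟨u, ⟨hu, hq⟩, rfl⟩, hov⟩
    exact ⟨u, hu, ⟨hov.1, hov.2⟩, hq⟩
  · rintro ⟨t, ht, hP, rfl⟩
    exact ⟨⟨t, ht, rfl⟩, _, ⟨t, ⟨ht, rfl⟩, rfl⟩, by exact_mod_cast hP⟩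

-- ===== VERDICT (by name: the statement is the Claim_ definition above) =====
theorem locate_page_numbers_spec : Claim_equal_locate_page_numbers := by
  intro texts chunks page_map _
  unfold Spec_locate_page_numbers locate_page_numbers locate_page_numbers_alt
  rw [PySem.List.foldl_append_singleton_eq_map]
  exact List.map_congr_left (fun chunk _ => by
    simp only []
    exact congrArg _ (per_chunk page_map _ _))
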